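-- pv_equiv track=rewrite | github.com/NevermoreKatana/Operating-system-security | RBAC model/RBAC.py | inherit_permissions
-- ===== SOURCE A (Python) =====
-- def inherit_permissions(role):
--     permissions = set()
--     if role in role_hierarchy:
--         parent_roles = role_hierarchy[role]
--         for parent_role in parent_roles:
--             permissions.update(inherit_permissions(parent_role))
--             if parent_role in permission_assignments:
--                 permissions.update(permission_assignments[parent_role])
--     if role in permission_assignments:
--         permissions.update(permission_assignments[role])
--     return permissions
--
-- role_hierarchy = {
--     'owner': [],
--     'manager': ['owner'],
--     'user': ['manager'],
--     'adv:user': ['user'],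
--     'adv:manager': ['manager']
-- }
--
-- permission_assignments = {
--     'owner': ['111'],
--     'manager': ['110'],
--     'user': ['100'],
--     'adv:user': ['110'],
--     'adv:manager': ['110']
-- }
-- ===== SOURCE B (Python) =====
-- def inherit_permissions(role):
--     # Iterative: discover role and all transitive ancestors with a worklist,
--     # then union the permission assignments of the discovered roles.
--     order = []
--     seen = set()
--     work = [role]
--     while work:
--         r = work.pop(0)
--         if r in seen:
--             continue
--         seen.add(r)
--         order.append(r)
--         work.extend(role_hierarchy.get(r, []))
--     permissions = set()
--     for r in reversed(order):
--         permissions.update(permission_assignments.get(r, []))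
--     return permissions
--
--
-- role_hierarchy = {
--     'owner': [],
--     'manager': ['owner'],
--     'user': ['manager'],
--     'adv:user': ['user'],
--     'adv:manager': ['manager']
-- }
--
-- permission_assignments = {
--     'owner': ['111'],
--     'manager': ['110'],
--     'user': ['100'],
--     'adv:user': ['110'],
--     'adv:manager': ['110']
-- }
-- ===== Notes on version B (the rewrite author's own statement) =====
-- stated objective: idiomatic
-- what changed: Replaced the recursion over the role hierarchy with an explicit iterative worklist traversal that collects the reachable roles (with a visited set) and then unions their permission assignments.
import Mathlib
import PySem

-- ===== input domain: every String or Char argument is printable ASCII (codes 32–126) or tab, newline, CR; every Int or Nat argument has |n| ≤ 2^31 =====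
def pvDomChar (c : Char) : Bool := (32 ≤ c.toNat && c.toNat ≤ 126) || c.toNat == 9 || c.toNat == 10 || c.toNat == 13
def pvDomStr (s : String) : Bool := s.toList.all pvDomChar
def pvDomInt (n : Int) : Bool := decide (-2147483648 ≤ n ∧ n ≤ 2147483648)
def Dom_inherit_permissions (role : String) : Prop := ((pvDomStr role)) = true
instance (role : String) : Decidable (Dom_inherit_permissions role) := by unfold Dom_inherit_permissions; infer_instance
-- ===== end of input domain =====

-- B replaces A's recursion over the role hierarchy by an iterative worklist traversal (idiomatic; same set of permissions).

-- ===== PORT A =====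
-- module constants role_hierarchy / permission_assignments
def pvRoleHierarchy : PySem.Dict String (List String) :=
  PySem.Dict.ofList [("owner", []), ("manager", ["owner"]), ("user", ["manager"]),
                     ("adv:user", ["user"]), ("adv:manager", ["manager"])]
def pvPermAssign : PySem.Dict String (List String) :=
  PySem.Dict.ofList [("owner", ["111"]), ("manager", ["110"]), ("user", ["100"]),
                     ("adv:user", ["110"]), ("adv:manager", ["110"])]

-- A's recursion, step for step; the fuel only makes it total (the fixed hierarchy has
-- recursion depth ≤ 4, so fuel 6 is never exhausted and the guard changes nothing).
def pvInhA : Nat → String → PySem.Set String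
  | 0, _ => PySem.Set.empty
  | fuel + 1, role =>
    let permissions : PySem.Set String := PySem.Set.empty
    let permissions :=
      match pvRoleHierarchy.get? role with
      | some parent_roles =>
          parent_roles.foldl (fun perms parent_role =>
            let perms := PySem.Set.update perms (pvInhA fuel parent_role)
            match pvPermAssign.get? parent_role with
            | some xs => PySem.Set.update perms xs
            | none => perms) permissions
      | none => permissions
    match pvPermAssign.get? role with
    | some xs => PySem.Set.update permissions xs
    | none => permissions

def inherit_permissions (role : String) : List String := pvInhA 6 role

-- ===== PORT B =====
-- the while-loop of Source B: pop from the front of the worklist, skip seen roles,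
-- record the role and extend the worklist with its parents; fuel only makes it total
-- (at most 4 distinct roles are reachable, so fuel 16 is never exhausted).
def pvDiscoverB : Nat → List String → PySem.Set String → List String → List String
  | 0, _, _, order => order
  | _ + 1, [], _, order => order
  | fuel + 1, r :: rest, seen, order =>
    if PySem.Set.contains seen r then
      pvDiscoverB fuel rest seen order
    else
      pvDiscoverB fuel (rest ++ (pvRoleHierarchy.get? r).getD [])
        (PySem.Set.add seen r) (order ++ [r])

def inherit_permissions_alt (role : String) : List String :=
  let order := pvDiscoverB 16 [role] PySem.Set.empty []
  order.reverse.foldl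
    (fun permissions r => PySem.Set.update permissions ((pvPermAssign.get? r).getD []))
    PySem.Set.empty

-- ===== PRECONDITION & SPEC =====
def Spec_inherit_permissions (role : String) (out : List String) : Prop := out = inherit_permissions_alt role
instance (role : String) (out : List String) : Decidable (Spec_inherit_permissions role out) := by unfold Spec_inherit_permissions; infer_instance

-- ===== CLAIM (what is proved, stated in full; the proofs are below) =====
def Claim_equal_inherit_permissions : Prop := ∀ (role : String), Dom_inherit_permissions role → Spec_inherit_permissions role (inherit_permissions role)

-- ===== LEMMAS AND PROOFS =====

theorem pvRH_get?_none (role : String)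
    (h1 : role ≠ "owner") (h2 : role ≠ "manager") (h3 : role ≠ "user")
    (h4 : role ≠ "adv:user") (h5 : role ≠ "adv:manager") :
    pvRoleHierarchy.get? role = none := by
  have hd : pvRoleHierarchy = PySem.Dict.mk [("owner", []), ("manager", ["owner"]),
      ("user", ["manager"]), ("adv:user", ["user"]), ("adv:manager", ["manager"])] := by decide
  simp [hd, Ne.symm h1, Ne.symm h2, Ne.symm h3, Ne.symm h4, Ne.symm h5,
    PySem.Dict.get?]

theorem pvPA_get?_none (role : String)
    (h1 : role ≠ "owner") (h2 : role ≠ "manager") (h3 : role ≠ "user")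
    (h4 : role ≠ "adv:user") (h5 : role ≠ "adv:manager") :
    pvPermAssign.get? role = none := by
  have hd : pvPermAssign = PySem.Dict.mk [("owner", ["111"]), ("manager", ["110"]),
      ("user", ["100"]), ("adv:user", ["110"]), ("adv:manager", ["110"])] := by decide
  simp [hd, Ne.symm h1, Ne.symm h2, Ne.symm h3, Ne.symm h4, Ne.symm h5,
    PySem.Dict.get?]

-- ===== VERDICT (by name: the statement is the Claim_ definition above) =====
theorem inherit_permissions_spec : Claim_equal_inherit_permissions := by
  intro role _
  unfold Spec_inherit_permissions
  by_cases h1 : role = "owner"; · subst h1; decide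
  by_cases h2 : role = "manager"; · subst h2; decide
  by_cases h3 : role = "user"; · subst h3; decide
  by_cases h4 : role = "adv:user"; · subst h4; decide
  by_cases h5 : role = "adv:manager"; · subst h5; decide
  have hRH := pvRH_get?_none role h1 h2 h3 h4 h5
  have hPA := pvPA_get?_none role h1 h2 h3 h4 h5
  simp [inherit_permissions, inherit_permissions_alt, pvInhA, pvDiscoverB, hRH, hPA,
    PySem.Set.empty, PySem.Set.contains, PySem.Set.update]
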